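-- pv_equiv track=rewrite | github.com/ICICLE-ai/VA_Dashboard_V3 | backend/milkOligoDB/src/parse_lisp_to_apis.py | process_expression
-- ===== SOURCE A (Python) =====
-- def process_expression(tokens, index, counter, operations):
--     if tokens[index] != '(':
--         # Atomic symbol
--         return tokens[index], index + 1
--     else:
--         index += 1  # Skip '('
--         func_name = tokens[index]
--         index += 1
--         args = []
--         while tokens[index] != ')':
--             if tokens[index] == '(':
--                 arg, index = process_expression(tokens, index, counter, operations)
--                 args.append(arg)
--             else:
--                 args.append(tokens[index])
--                 index += 1
--         index += 1  # Skip ')'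
--         counter[0] += 1
--         identifier = f"#{counter[0]}"
--         # Determine the operation
--         if func_name == 'JOIN':
--             relation = args[0]
--             entity = args[1]
--             if relation.endswith('_inv'):
--                 relation = relation[:-4]  # Remove '_inv'
--                 operation = f"https://icfoods-know.o18s.com/api/know/propositions/subject/{entity}/predicate/{relation}"
--             else:
--                 operation = f"https://icfoods-know.o18s.com/api/know/propositions/object/{entity}/predicate/{relation}"
--         elif func_name == 'AND':
--             operation = f"AND({args[0]}, {args[1]})"
--         elif func_name == 'COUNT':
--             operation = f"COUNT({args[0]})"
--         else:
--             operation = f"{func_name.lower()}({', '.join(args)})"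
--         operations[identifier] = operation
--         return identifier, index
-- ===== SOURCE B (Python) =====
-- def process_expression(tokens, index, counter, operations):
--     t = tokens[index]
--     if t != '(':
--         # Atomic symbol
--         return t, index + 1
--     # Explicit stack of frames: each frame is [func_name, args]
--     stack = []
--     i = index
--     while True:
--         t = tokens[i]
--         if t == '(':
--             stack.append([tokens[i + 1], []])
--             i += 2
--         elif t == ')':
--             func_name, args = stack.pop()
--             counter[0] += 1
--             identifier = f"#{counter[0]}"
--             if func_name == 'JOIN':
--                 relation = args[0]
--                 entity = args[1]
--                 if relation.endswith('_inv'):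
--                     relation = relation[:-4]
--                     operation = f"https://icfoods-know.o18s.com/api/know/propositions/subject/{entity}/predicate/{relation}"
--                 else:
--                     operation = f"https://icfoods-know.o18s.com/api/know/propositions/object/{entity}/predicate/{relation}"
--             elif func_name == 'AND':
--                 operation = f"AND({args[0]}, {args[1]})"
--             elif func_name == 'COUNT':
--                 operation = f"COUNT({args[0]})"
--             else:
--                 operation = f"{func_name.lower()}({', '.join(args)})"
--             operations[identifier] = operation
--             i += 1
--             if not stack:
--                 return identifier, i
--             stack[-1][1].append(identifier)
--         else:
--             stack[-1][1].append(t)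
--             i += 1
-- ===== Notes on version B (the rewrite author's own statement) =====
-- stated objective: alternative
-- what changed: Replaced A's recursive-descent parser by a single non-recursive loop over an explicit stack of (func_name, args) frames that pushes on '(', collects atoms, and on ')' pops a frame, builds the operation and feeds the identifier to the parent frame.
import Mathlib
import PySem

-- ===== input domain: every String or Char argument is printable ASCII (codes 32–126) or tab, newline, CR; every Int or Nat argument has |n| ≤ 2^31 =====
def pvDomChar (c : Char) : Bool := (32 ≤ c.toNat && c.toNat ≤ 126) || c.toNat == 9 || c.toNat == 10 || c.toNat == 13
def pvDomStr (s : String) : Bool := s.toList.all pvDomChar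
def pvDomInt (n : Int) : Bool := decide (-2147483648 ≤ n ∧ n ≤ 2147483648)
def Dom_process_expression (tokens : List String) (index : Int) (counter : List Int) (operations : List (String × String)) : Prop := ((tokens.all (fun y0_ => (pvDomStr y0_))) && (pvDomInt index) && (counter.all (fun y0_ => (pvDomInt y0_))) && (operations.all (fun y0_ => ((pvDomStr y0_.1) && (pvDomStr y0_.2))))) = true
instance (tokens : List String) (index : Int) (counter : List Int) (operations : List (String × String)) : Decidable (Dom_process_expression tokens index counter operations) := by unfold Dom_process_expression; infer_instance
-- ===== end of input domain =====

-- B rewrites A's recursive-descent parser as an explicit loop over a stack of (func_name, args)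
-- frames (objective: alternative, same cost; avoids Python's recursion depth).  Both A and B
-- mutate `counter` and `operations` identically; the equivalence proved here is about the
-- returned (identifier, next-index) pair.

-- ===== PORT A =====
-- The operation-building block is textually identical in A and B, so both ports share it.
-- `none` = the IndexError Python raises on args[0]/args[1]/args[0] for JOIN/AND/COUNT.
def pvMkOp (func_name : String) (args : List String) : Option String :=
  if func_name = "JOIN" then
    match args with
    | a0 :: a1 :: _ =>
      if PySem.Str.endswith a0 "_inv" then
        some ("https://icfoods-know.o18s.com/api/know/propositions/subject/" ++ a1 ++
              "/predicate/" ++ PySem.Str.slice a0 none (some (-4)))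
      else
        some ("https://icfoods-know.o18s.com/api/know/propositions/object/" ++ a1 ++
              "/predicate/" ++ a0)
    | _ => none
  else if func_name = "AND" then
    match args with
    | a0 :: a1 :: _ => some ("AND(" ++ a0 ++ ", " ++ a1 ++ ")")
    | _ => none
  else if func_name = "COUNT" then
    match args with
    | a0 :: _ => some ("COUNT(" ++ a0 ++ ")")
    | _ => none
  else
    some (PySem.Str.lower func_name ++ "(" ++ PySem.Str.join ", " args ++ ")")

-- A's recursion, fuelled for totality; `none` = IndexError (out-of-range token/counter access,
-- or missing JOIN/AND/COUNT argument).  State (counter, operations) is threaded to model A's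
-- in-place mutation.
mutual
def pAexpr : Nat → List String → Int → List Int → List (String × String) →
    Option (String × Int × List Int × List (String × String))
  | 0, _, _, _, _ => none
  | f + 1, tokens, i, c, o =>
    match PySem.List.pyGet? tokens i with
    | none => none
    | some t =>
      if t ≠ "(" then some (t, i + 1, c, o)
      else
        match PySem.List.pyGet? tokens (i + 1) with
        | none => none
        | some fname =>
          match pAargs f tokens (i + 2) [] c o with
          | none => none
          | some (args, i', c', o') =>
            match c' with
            | [] => none
            | c0 :: ctl =>
              let ident := "#" ++ PySem.Int.toStr (c0 + 1)
              match pvMkOp fname args with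
              | none => none
              | some op => some (ident, i', (c0 + 1) :: ctl, (PySem.Dict.insert ⟨o'⟩ ident op).items)

def pAargs : Nat → List String → Int → List String → List Int → List (String × String) →
    Option (List String × Int × List Int × List (String × String))
  | 0, _, _, _, _, _ => none
  | f + 1, tokens, i, args, c, o =>
    match PySem.List.pyGet? tokens i with
    | none => none
    | some t =>
      if t = ")" then some (args, i + 1, c, o)
      else if t = "(" then
        match pAexpr f tokens i c o with
        | none => none
        | some (a, i', c', o') => pAargs f tokens i' (args ++ [a]) c' o'
      else pAargs f tokens (i + 1) (args ++ [t]) c o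
end

def process_expression (tokens : List String) (index : Int) (counter : List Int) (operations : List (String × String)) : String × Int :=
  match pAexpr (4 * (tokens.length + index.natAbs) + 20) tokens index counter operations with
  | some (s, i, _, _) => (s, i)
  | none => ("", 0)   -- unreachable under Pre_ (Python raises there)

-- ===== PORT B =====
-- B's explicit machine: stack of (func_name, collected args) frames, one token per step.
def pBloop : Nat → List String → Int → List (String × List String) → List Int → List (String × String) →
    Option (String × Int × List Int × List (String × String))
  | 0, _, _, _, _, _ => none
  | f + 1, tokens, i, stack, c, o =>
    match PySem.List.pyGet? tokens i with
    | none => none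
    | some t =>
      if t = "(" then
        match PySem.List.pyGet? tokens (i + 1) with
        | none => none
        | some name => pBloop f tokens (i + 2) ((name, []) :: stack) c o
      else if t = ")" then
        match stack with
        | [] => none
        | (name, args) :: rest =>
          match c with
          | [] => none
          | c0 :: ctl =>
            let ident := "#" ++ PySem.Int.toStr (c0 + 1)
            match pvMkOp name args with
            | none => none
            | some op =>
              let o' := (PySem.Dict.insert ⟨o⟩ ident op).items
              match rest with
              | [] => some (ident, i + 1, (c0 + 1) :: ctl, o')
              | (pn, pa) :: rr => pBloop f tokens (i + 1) ((pn, pa ++ [ident]) :: rr) ((c0 + 1) :: ctl) o'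
      else
        match stack with
        | [] => none
        | (pn, pa) :: rr => pBloop f tokens (i + 1) ((pn, pa ++ [t]) :: rr) c o

def process_expression_alt (tokens : List String) (index : Int) (counter : List Int) (operations : List (String × String)) : String × Int :=
  match PySem.List.pyGet? tokens index with
  | none => ("", 0)   -- unreachable under Pre_ (Python raises there)
  | some t =>
    if t ≠ "(" then (t, index + 1)
    else
      match pBloop (2 * (tokens.length + index.natAbs) + 10) tokens index [] counter operations with
      | some (s, i, _, _) => (s, i)
      | none => ("", 0)   -- unreachable under Pre_ (Python raises there)

-- ===== PRECONDITION & SPEC =====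
-- Pre_ = exactly the inputs on which Python A returns (no IndexError): the token at `index`
-- exists and either is not '(' (atomic case), or `counter` is non-empty and the tokens from
-- `index` on (Python's negative-index wraparound reads the suffix and then the whole list)
-- start with one complete well-formed expression of the grammar
--   E → '(' name item* ')',  item → non-paren token | E,
-- where a JOIN/AND frame collects at least 2 items and a COUNT frame at least 1
-- (otherwise Python raises IndexError on args[0]/args[1]).
-- The scanner below is that grammar check, stack = (frame name, items collected so far).
mutual
def pvScanName : List String → List (String × Nat) → Bool
  | [], _ => false
  | t :: r, st => pvScanBody r ((t, 0) :: st)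

def pvScanBody : List String → List (String × Nat) → Bool
  | [], _ => false
  | t :: r, st =>
    if t = ")" then
      match st with
      | [] => false
      | (name, cnt) :: rest =>
        if (name = "JOIN" ∨ name = "AND") ∧ cnt < 2 then false
        else if name = "COUNT" ∧ cnt < 1 then false
        else
          match rest with
          | [] => true
          | (pn, pc) :: rr => pvScanBody r ((pn, pc + 1) :: rr)
    else if t = "(" then pvScanName r st
    else
      match st with
      | [] => false
      | (pn, pc) :: rr => pvScanBody r ((pn, pc + 1) :: rr)
end

def pvStream (tokens : List String) (index : Int) : List String :=
  if index < 0 then tokens.drop (tokens.length + index).toNat ++ tokens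
  else tokens.drop index.toNat

def pvPreB (tokens : List String) (index : Int) (counter : List Int) : Bool :=
  match PySem.List.pyGet? tokens index with
  | none => false
  | some t =>
    if t = "(" then decide (counter ≠ []) && pvScanName (pvStream tokens index).tail []
    else true

def Pre_process_expression (tokens : List String) (index : Int) (counter : List Int) (operations : List (String × String)) : Prop :=
  pvPreB tokens index counter = true

instance (tokens : List String) (index : Int) (counter : List Int) (operations : List (String × String)) : Decidable (Pre_process_expression tokens index counter operations) := by
  unfold Pre_process_expression; infer_instance

def pvWitness_process_expression : List String × Int × List Int × (List (String × String)) :=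
  (["(", "JOIN", "has_part_inv", "milk", ")"], 0, [0], [])

def Spec_process_expression (tokens : List String) (index : Int) (counter : List Int) (operations : List (String × String)) (out : String × Int) : Prop := out = process_expression_alt tokens index counter operations
instance (tokens : List String) (index : Int) (counter : List Int) (operations : List (String × String)) (out : String × Int) : Decidable (Spec_process_expression tokens index counter operations out) := by unfold Spec_process_expression; infer_instance

-- ===== CLAIM (what is proved, stated in full; the proofs are below) =====
def Claim_equal_process_expression : Prop := ∀ (tokens : List String) (index : Int) (counter : List Int) (operations : List (String × String)), Dom_process_expression tokens index counter operations → Pre_process_expression tokens index counter operations → Spec_process_expression tokens index counter operations (process_expression tokens index counter operations)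

-- ===== LEMMAS AND PROOFS =====

-- fuel monotonicity of A's recursion
theorem pA_mono (f : Nat) : ∀ f', f ≤ f' →
    (∀ tokens i c o r, pAexpr f tokens i c o = some r → pAexpr f' tokens i c o = some r) ∧
    (∀ tokens i args c o r, pAargs f tokens i args c o = some r → pAargs f' tokens i args c o = some r) := by
  induction f with
  | zero =>
    intro f' _
    constructor
    · intro tokens i c o r h; simp [pAexpr] at h
    · intro tokens i args c o r h; simp [pAargs] at h
  | succ f ih =>
    intro f' hf'
    obtain ⟨f'', rfl⟩ : ∃ f'', f' = f'' + 1 := ⟨f' - 1, by omega⟩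
    obtain ⟨ihe, iha⟩ := ih f'' (by omega)
    constructor
    · intro tokens i c o r h
      simp only [pAexpr] at h ⊢
      cases hg : PySem.List.pyGet? tokens i with
      | none => rw [hg] at h; simp at h
      | some t =>
        rw [hg] at h; dsimp only at h ⊢
        by_cases ht : t ≠ "("
        · rw [if_pos ht] at h ⊢; exact h
        · rw [if_neg ht] at h ⊢
          cases hg2 : PySem.List.pyGet? tokens (i + 1) with
          | none => rw [hg2] at h; simp at h
          | some fname =>
            rw [hg2] at h; dsimp only at h ⊢
            cases hA : pAargs f tokens (i + 2) [] c o with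
            | none => rw [hA] at h; simp at h
            | some q =>
              rw [hA] at h
              rw [iha _ _ _ _ _ _ hA]
              exact h
    · intro tokens i args c o r h
      simp only [pAargs] at h ⊢
      cases hg : PySem.List.pyGet? tokens i with
      | none => rw [hg] at h; simp at h
      | some t =>
        rw [hg] at h; dsimp only at h ⊢
        by_cases ht : t = ")"
        · rw [if_pos ht] at h ⊢; exact h
        · rw [if_neg ht] at h ⊢
          by_cases ht2 : t = "("
          · rw [if_pos ht2] at h ⊢
            cases hE : pAexpr f tokens i c o with
            | none => rw [hE] at h; simp at h
            | some q =>
              obtain ⟨a, i', c', o'⟩ := q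
              rw [hE] at h
              rw [ihe _ _ _ _ _ hE]
              exact iha _ _ _ _ _ _ h
          · rw [if_neg ht2] at h ⊢
            exact iha _ _ _ _ _ _ h

-- fuel monotonicity of B's machine
theorem pB_mono (g : Nat) : ∀ g', g ≤ g' →
    ∀ tokens i st c o r, pBloop g tokens i st c o = some r → pBloop g' tokens i st c o = some r := by
  induction g with
  | zero => intro g' _ tokens i st c o r h; simp [pBloop] at h
  | succ g ih =>
    intro g' hg' tokens i st c o r h
    obtain ⟨g'', rfl⟩ : ∃ g'', g' = g'' + 1 := ⟨g' - 1, by omega⟩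
    have ih' := ih g'' (by omega)
    simp only [pBloop] at h ⊢
    cases hg : PySem.List.pyGet? tokens i with
    | none => rw [hg] at h; simp at h
    | some t =>
      rw [hg] at h; dsimp only at h ⊢
      by_cases h1 : t = "("
      · rw [if_pos h1] at h ⊢
        cases hg2 : PySem.List.pyGet? tokens (i + 1) with
        | none => rw [hg2] at h; simp at h
        | some name =>
          rw [hg2] at h; dsimp only at h ⊢
          exact ih' _ _ _ _ _ _ h
      · rw [if_neg h1] at h ⊢
        by_cases h2 : t = ")"
        · rw [if_pos h2] at h ⊢
          cases st with
          | nil => simp at h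
          | cons fr rest =>
            obtain ⟨name, args⟩ := fr
            cases c with
            | nil => simp at h
            | cons c0 ctl =>
              dsimp only at h ⊢
              cases hmk : pvMkOp name args with
              | none => rw [hmk] at h; simp at h
              | some op =>
                rw [hmk] at h; dsimp only at h ⊢
                cases rest with
                | nil => exact h
                | cons pr rr =>
                  obtain ⟨pn, pa⟩ := pr
                  dsimp only at h ⊢
                  exact ih' _ _ _ _ _ _ h
        · rw [if_neg h2] at h ⊢
          cases st with
          | nil => simp at h
          | cons fr rr =>
            obtain ⟨pn, pa⟩ := fr
            dsimp only at h ⊢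
            exact ih' _ _ _ _ _ _ h

-- single machine steps of B, as rewriting lemmas
theorem pBloop_open (g : Nat) (tokens : List String) (i : Int) (fname : String)
    (st : List (String × List String)) (c : List Int) (o : List (String × String))
    (hg : PySem.List.pyGet? tokens i = some "(") (hg2 : PySem.List.pyGet? tokens (i + 1) = some fname) :
    pBloop (g + 1) tokens i st c o = pBloop g tokens (i + 2) ((fname, []) :: st) c o := by
  simp only [pBloop]; rw [hg]; dsimp only; rw [if_pos rfl, hg2]

theorem pBloop_close_nil (g : Nat) (tokens : List String) (i : Int) (name op : String)
    (args : List String) (c0 : Int) (ctl : List Int) (o : List (String × String))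
    (hg : PySem.List.pyGet? tokens i = some ")") (hmk : pvMkOp name args = some op) :
    pBloop (g + 1) tokens i [(name, args)] (c0 :: ctl) o =
      some ("#" ++ PySem.Int.toStr (c0 + 1), i + 1, (c0 + 1) :: ctl,
        (PySem.Dict.insert ⟨o⟩ ("#" ++ PySem.Int.toStr (c0 + 1)) op).items) := by
  simp only [pBloop]; rw [hg]; dsimp only
  rw [if_neg (by decide), if_pos rfl]; rw [hmk]

theorem pBloop_close_cons (g : Nat) (tokens : List String) (i : Int) (name op pn : String)
    (args pa : List String) (rr : List (String × List String)) (c0 : Int) (ctl : List Int)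
    (o : List (String × String))
    (hg : PySem.List.pyGet? tokens i = some ")") (hmk : pvMkOp name args = some op) :
    pBloop (g + 1) tokens i ((name, args) :: (pn, pa) :: rr) (c0 :: ctl) o =
      pBloop g tokens (i + 1) ((pn, pa ++ ["#" ++ PySem.Int.toStr (c0 + 1)]) :: rr) ((c0 + 1) :: ctl)
        (PySem.Dict.insert ⟨o⟩ ("#" ++ PySem.Int.toStr (c0 + 1)) op).items := by
  simp only [pBloop]; rw [hg]; dsimp only
  rw [if_neg (by decide), if_pos rfl]; rw [hmk]

theorem pBloop_atom (g : Nat) (tokens : List String) (i : Int) (t pn : String) (pa : List String)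
    (rr : List (String × List String)) (c : List Int) (o : List (String × String))
    (hg : PySem.List.pyGet? tokens i = some t) (h1 : t ≠ "(") (h2 : t ≠ ")") :
    pBloop (g + 1) tokens i ((pn, pa) :: rr) c o = pBloop g tokens (i + 1) ((pn, pa ++ [t]) :: rr) c o := by
  simp only [pBloop]; rw [hg]; dsimp only; rw [if_neg h1, if_neg h2]

-- assembling a successful step of A's pAexpr from its pieces
theorem pAexpr_build (f : Nat) (tokens : List String) (i : Int) (c : List Int)
    (o o1 : List (String × String)) (fname op : String) (A1 : List String) (i1 : Int)
    (c0 : Int) (ctl : List Int)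
    (hg : PySem.List.pyGet? tokens i = some "(") (hg2 : PySem.List.pyGet? tokens (i + 1) = some fname)
    (hargs : pAargs f tokens (i + 2) [] c o = some (A1, i1, c0 :: ctl, o1))
    (hmk : pvMkOp fname A1 = some op) :
    pAexpr (f + 1) tokens i c o = some ("#" ++ PySem.Int.toStr (c0 + 1), i1, (c0 + 1) :: ctl,
      (PySem.Dict.insert ⟨o1⟩ ("#" ++ PySem.Int.toStr (c0 + 1)) op).items) := by
  simp only [pAexpr]; rw [hg]; dsimp only
  rw [if_neg (by simp), hg2]; dsimp only
  rw [hargs]; dsimp only; rw [hmk]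

-- progress: a successful sub-parse advances the index, and pAargs stops right after a ')'
theorem pA_progress (f : Nat) :
    (∀ tokens i c o a i' c' o', pAexpr f tokens i c o = some (a, i', c', o') → i < i' ∧
      (PySem.List.pyGet? tokens i = some "(" → PySem.List.pyGet? tokens (i' - 1) = some ")")) ∧
    (∀ tokens i args c o A i' c' o', pAargs f tokens i args c o = some (A, i', c', o') →
      i < i' ∧ PySem.List.pyGet? tokens (i' - 1) = some ")") := by
  induction f with
  | zero =>
    constructor
    · intro tokens i c o a i' c' o' h; simp [pAexpr] at h
    · intro tokens i args c o A i' c' o' h; simp [pAargs] at h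
  | succ f ih =>
    obtain ⟨ihe, iha⟩ := ih
    constructor
    · intro tokens i c o a i' c' o' h
      simp only [pAexpr] at h
      cases hg : PySem.List.pyGet? tokens i with
      | none => rw [hg] at h; simp at h
      | some t =>
        rw [hg] at h; dsimp only at h
        by_cases ht : t ≠ "("
        · rw [if_pos ht] at h
          simp only [Option.some.injEq, Prod.mk.injEq] at h
          obtain ⟨rfl, rfl, rfl, rfl⟩ := h
          refine ⟨by omega, ?_⟩
          intro hpar
          exact absurd (Option.some.inj hpar) ht
        · rw [if_neg ht] at h
          cases hg2 : PySem.List.pyGet? tokens (i + 1) with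
          | none => rw [hg2] at h; simp at h
          | some fname =>
            rw [hg2] at h; dsimp only at h
            cases hA : pAargs f tokens (i + 2) [] c o with
            | none => rw [hA] at h; simp at h
            | some q =>
              obtain ⟨args, i2, c2, o2⟩ := q
              rw [hA] at h; dsimp only at h
              cases c2 with
              | nil => simp at h
              | cons c0 ctl =>
                dsimp only at h
                cases hmk : pvMkOp fname args with
                | none => rw [hmk] at h; simp at h
                | some op =>
                  rw [hmk] at h; dsimp only at h
                  simp only [Option.some.injEq, Prod.mk.injEq] at h
                  obtain ⟨rfl, rfl, rfl, rfl⟩ := h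
                  obtain ⟨hlt, hcl⟩ := iha _ _ _ _ _ _ _ _ _ hA
                  exact ⟨by omega, fun _ => hcl⟩
    · intro tokens i args c o A i' c' o' h
      simp only [pAargs] at h
      cases hg : PySem.List.pyGet? tokens i with
      | none => rw [hg] at h; simp at h
      | some t =>
        rw [hg] at h; dsimp only at h
        by_cases ht : t = ")"
        · rw [if_pos ht] at h
          simp only [Option.some.injEq, Prod.mk.injEq] at h
          obtain ⟨rfl, rfl, rfl, rfl⟩ := h
          subst ht
          refine ⟨by omega, ?_⟩
          have : i + 1 - 1 = i := by omega
          rw [this]; exact hg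
        · rw [if_neg ht] at h
          by_cases ht2 : t = "("
          · rw [if_pos ht2] at h
            cases hE : pAexpr f tokens i c o with
            | none => rw [hE] at h; simp at h
            | some q =>
              obtain ⟨a, i2, c2, o2⟩ := q
              rw [hE] at h; dsimp only at h
              obtain ⟨hlt1, _⟩ := ihe _ _ _ _ _ _ _ _ hE
              obtain ⟨hlt2, hcl⟩ := iha _ _ _ _ _ _ _ _ _ h
              exact ⟨by omega, hcl⟩
          · rw [if_neg ht2] at h
            obtain ⟨hlt, hcl⟩ := iha _ _ _ _ _ _ _ _ _ h
            exact ⟨by omega, hcl⟩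

-- forward simulation: A's recursion is realised by B's machine
theorem pA_forward (f : Nat) :
    (∀ tokens i c o a i' c' o', pAexpr f tokens i c o = some (a, i', c', o') →
      PySem.List.pyGet? tokens i = some "(" →
      ∃ k : Nat, (k : Int) ≤ i' - i ∧
        (∀ g, pBloop (g + k) tokens i [] c o = some (a, i', c', o')) ∧
        (∀ g pn pa rr, pBloop (g + k) tokens i ((pn, pa) :: rr) c o =
           pBloop g tokens i' ((pn, pa ++ [a]) :: rr) c' o')) ∧
    (∀ tokens i args c o A i' c' o', pAargs f tokens i args c o = some (A, i', c', o') →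
      ∃ k : Nat, (k : Int) ≤ i' - 1 - i ∧
        ∀ g name rest, pBloop (g + k) tokens i ((name, args) :: rest) c o =
          pBloop g tokens (i' - 1) ((name, A) :: rest) c' o') := by
  induction f with
  | zero =>
    constructor
    · intro tokens i c o a i' c' o' h; simp [pAexpr] at h
    · intro tokens i args c o A i' c' o' h; simp [pAargs] at h
  | succ f ih =>
    obtain ⟨ihe, iha⟩ := ih
    constructor
    · intro tokens i c o a i' c' o' h hpar
      simp only [pAexpr] at h
      rw [hpar] at h; dsimp only at h
      rw [if_neg (by simp)] at h
      cases hg2 : PySem.List.pyGet? tokens (i + 1) with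
      | none => rw [hg2] at h; simp at h
      | some fname =>
        rw [hg2] at h; dsimp only at h
        cases hA : pAargs f tokens (i + 2) [] c o with
        | none => rw [hA] at h; simp at h
        | some q =>
          obtain ⟨args, i2, c2, o2⟩ := q
          rw [hA] at h; dsimp only at h
          cases c2 with
          | nil => simp at h
          | cons c0 ctl =>
            dsimp only at h
            cases hmk : pvMkOp fname args with
            | none => rw [hmk] at h; simp at h
            | some op =>
              rw [hmk] at h; dsimp only at h
              simp only [Option.some.injEq, Prod.mk.injEq] at h
              obtain ⟨rfl, rfl, rfl, rfl⟩ := h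
              obtain ⟨karg, hkb, hstep⟩ := iha _ _ _ _ _ _ _ _ _ hA
              obtain ⟨hadv, hcl⟩ := (pA_progress f).2 _ _ _ _ _ _ _ _ _ hA
              have hi2 : i2 - 1 + 1 = i2 := by omega
              refine ⟨karg + 2, by push_cast; omega, ?_, ?_⟩
              · intro g
                have hfe : g + (karg + 2) = (g + 1 + karg) + 1 := by omega
                rw [hfe, pBloop_open _ _ _ fname _ _ _ hpar hg2]
                have hst := hstep (g + 1) fname []
                rw [hst]
                rw [pBloop_close_nil _ _ _ _ _ _ _ _ _ hcl hmk, hi2]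
              · intro g pn pa rr
                have hfe : g + (karg + 2) = (g + 1 + karg) + 1 := by omega
                rw [hfe, pBloop_open _ _ _ fname _ _ _ hpar hg2]
                have hst := hstep (g + 1) fname ((pn, pa) :: rr)
                rw [hst]
                rw [pBloop_close_cons _ _ _ _ _ _ _ _ _ _ _ _ hcl hmk, hi2]
    · intro tokens i args c o A i' c' o' h
      simp only [pAargs] at h
      cases hg : PySem.List.pyGet? tokens i with
      | none => rw [hg] at h; simp at h
      | some t =>
        rw [hg] at h; dsimp only at h
        by_cases ht : t = ")"
        · rw [if_pos ht] at h
          simp only [Option.some.injEq, Prod.mk.injEq] at h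
          obtain ⟨rfl, rfl, rfl, rfl⟩ := h
          subst ht
          refine ⟨0, by omega, ?_⟩
          intro g name rest
          have hi : i + 1 - 1 = i := by omega
          rw [hi]; simp
        · rw [if_neg ht] at h
          by_cases ht2 : t = "("
          · rw [if_pos ht2] at h
            cases hE : pAexpr f tokens i c o with
            | none => rw [hE] at h; simp at h
            | some q =>
              obtain ⟨a, i2, c2, o2⟩ := q
              rw [hE] at h; dsimp only at h
              subst ht2
              obtain ⟨k1, hk1, _, hcons⟩ := ihe _ _ _ _ _ _ _ _ hE hg
              obtain ⟨k2, hk2, hstep2⟩ := iha _ _ _ _ _ _ _ _ _ h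
              refine ⟨k1 + k2, by push_cast; omega, ?_⟩
              intro g name rest
              have hfe : g + (k1 + k2) = (g + k2) + k1 := by omega
              rw [hfe, hcons (g + k2) name args rest, hstep2 g name rest]
          · rw [if_neg ht2] at h
            obtain ⟨k0, hk0, hs⟩ := iha _ _ _ _ _ _ _ _ _ h
            refine ⟨k0 + 1, by push_cast; omega, ?_⟩
            intro g name rest
            have hfe : g + (k0 + 1) = (g + k0) + 1 := by omega
            rw [hfe, pBloop_atom _ _ _ _ _ _ _ _ _ hg ht2 ht, hs g name rest]

-- backward simulation: a successful machine run decomposes into A's recursion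
theorem pB_backward (g : Nat) : ∀ tokens i name args rest c o r,
    pBloop g tokens i ((name, args) :: rest) c o = some r →
    ∃ A i' c' o' f, f ≤ 2 * g ∧ pAargs f tokens i args c o = some (A, i', c', o') ∧
      pBloop g tokens (i' - 1) ((name, A) :: rest) c' o' = some r := by
  induction g using Nat.strong_induction_on with
  | _ g ih =>
    intro tokens i name args rest c o r h
    cases g with
    | zero => simp [pBloop] at h
    | succ g0 =>
      have h0 := h
      simp only [pBloop] at h
      cases hg : PySem.List.pyGet? tokens i with
      | none => rw [hg] at h; simp at h
      | some t =>
        rw [hg] at h; dsimp only at h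
        by_cases h1 : t = "("
        · rw [if_pos h1] at h
          cases hg2 : PySem.List.pyGet? tokens (i + 1) with
          | none => rw [hg2] at h; simp at h
          | some fname =>
            rw [hg2] at h; dsimp only at h
            subst h1
            obtain ⟨A1, i1, c1, o1, f1, hf1, hargs1, hcont⟩ := ih g0 (by omega) _ _ _ _ _ _ _ _ h
            obtain ⟨hadv, hcl⟩ := (pA_progress f1).2 _ _ _ _ _ _ _ _ _ hargs1
            cases g0 with
            | zero => simp [pBloop] at hcont
            | succ g1 =>
              simp only [pBloop] at hcont
              rw [hcl] at hcont; dsimp only at hcont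
              rw [if_neg (by decide), if_pos rfl] at hcont
              cases c1 with
              | nil => simp at hcont
              | cons c0 ctl =>
                dsimp only at hcont
                cases hmk : pvMkOp fname A1 with
                | none => rw [hmk] at hcont; simp at hcont
                | some op =>
                  rw [hmk] at hcont; dsimp only at hcont
                  have hi1 : i1 - 1 + 1 = i1 := by omega
                  rw [hi1] at hcont
                  obtain ⟨A, i', c', o', f2, hf2, hargs2, hcont2⟩ :=
                    ih g1 (by omega) _ _ _ _ _ _ _ _ hcont
                  have hE := pAexpr_build f1 tokens i c o o1 fname op A1 i1 c0 ctl hg hg2 hargs1 hmk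
                  refine ⟨A, i', c', o', max (f1 + 1) f2 + 1, by omega, ?_, ?_⟩
                  · simp only [pAargs]
                    rw [hg]; dsimp only
                    rw [if_neg (by decide), if_pos rfl]
                    have hE' := (pA_mono (f1 + 1) (max (f1 + 1) f2) (by omega)).1 _ _ _ _ _ hE
                    rw [hE']; dsimp only
                    exact (pA_mono f2 (max (f1 + 1) f2) (by omega)).2 _ _ _ _ _ _ hargs2
                  · exact pB_mono g1 (g1 + 2) (by omega) _ _ _ _ _ _ hcont2
        · rw [if_neg h1] at h
          by_cases h2 : t = ")"
          · rw [if_pos h2] at h; subst h2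
            cases c with
            | nil => simp at h
            | cons c0 ctl =>
              dsimp only at h
              cases hmk : pvMkOp name args with
              | none => rw [hmk] at h; simp at h
              | some op =>
                refine ⟨args, i + 1, c0 :: ctl, o, 1, by omega, ?_, ?_⟩
                · simp only [pAargs]; rw [hg]; dsimp only; rw [if_pos rfl]
                · have hi : i + 1 - 1 = i := by omega
                  rw [hi]; exact h0
          · rw [if_neg h2] at h
            obtain ⟨A, i', c', o', f0, hf0, ha0, hc0⟩ := ih g0 (by omega) _ _ _ _ _ _ _ _ h
            refine ⟨A, i', c', o', f0 + 1, by omega, ?_, ?_⟩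
            · simp only [pAargs]
              rw [hg]; dsimp only
              rw [if_neg h2, if_neg h1]
              exact ha0
            · exact pB_mono g0 (g0 + 1) (by omega) _ _ _ _ _ _ hc0

-- ===== VERDICT (by name: the statement is the Claim_ definition above) =====
theorem process_expression_spec : Claim_equal_process_expression := by
  intro tokens index counter operations hdom hpre
  unfold Spec_process_expression process_expression process_expression_alt
  cases hg : PySem.List.pyGet? tokens index with
  | none =>
    obtain ⟨F0, hF⟩ : ∃ F0, 4 * (tokens.length + index.natAbs) + 20 = F0 + 1 :=
      ⟨4 * (tokens.length + index.natAbs) + 19, by omega⟩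
    rw [hF]; simp only [pAexpr]; rw [hg]
  | some t =>
    by_cases ht : t = "("
    · subst ht
      cases hA : pAexpr (4 * (tokens.length + index.natAbs) + 20) tokens index counter operations with
      | some q =>
        obtain ⟨a, i', c', o'⟩ := q
        obtain ⟨k, hk, hnil, _⟩ := (pA_forward _).1 _ _ _ _ _ _ _ _ hA hg
        obtain ⟨hadv, hclf⟩ := (pA_progress _).1 _ _ _ _ _ _ _ _ hA
        have hcl := hclf hg
        have hrange : i' - 1 < (tokens.length : Int) := by
          by_contra hcon
          have hnone : PySem.List.pyGet? tokens (i' - 1) = none := by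
            rw [PySem.List.pyGet?_eq_none_iff]
            simp only [PySem.Raise.InRange]
            omega
          rw [hnone] at hcl; simp at hcl
        have hkG : k ≤ 2 * (tokens.length + index.natAbs) + 10 := by omega
        have hfe : 2 * (tokens.length + index.natAbs) + 10 =
            (2 * (tokens.length + index.natAbs) + 10 - k) + k := by omega
        dsimp only
        rw [if_neg (by simp), hfe, hnil]
      | none =>
        cases hB : pBloop (2 * (tokens.length + index.natAbs) + 10) tokens index [] counter operations with
        | none => simp
        | some r =>
          exfalso
          obtain ⟨G0, hG⟩ : ∃ G0, 2 * (tokens.length + index.natAbs) + 10 = G0 + 1 :=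
            ⟨2 * (tokens.length + index.natAbs) + 9, by omega⟩
          rw [hG] at hB
          simp only [pBloop] at hB
          rw [hg] at hB; dsimp only at hB
          rw [if_pos rfl] at hB
          cases hg2 : PySem.List.pyGet? tokens (index + 1) with
          | none => rw [hg2] at hB; simp at hB
          | some fname =>
            rw [hg2] at hB; dsimp only at hB
            obtain ⟨A1, i1, c1, o1, f1, hf1, hargs1, hcont⟩ := pB_backward G0 _ _ _ _ _ _ _ _ hB
            obtain ⟨hadv, hcl⟩ := (pA_progress f1).2 _ _ _ _ _ _ _ _ _ hargs1
            cases G0 with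
            | zero => simp [pBloop] at hcont
            | succ G1 =>
              simp only [pBloop] at hcont
              rw [hcl] at hcont; dsimp only at hcont
              rw [if_neg (by decide), if_pos rfl] at hcont
              cases c1 with
              | nil => simp at hcont
              | cons c0 ctl =>
                dsimp only at hcont
                cases hmk : pvMkOp fname A1 with
                | none => rw [hmk] at hcont; simp at hcont
                | some op =>
                  have hE := pAexpr_build f1 tokens index counter operations o1 fname op A1 i1 c0 ctl hg hg2 hargs1 hmk
                  have hEF := (pA_mono (f1 + 1) (4 * (tokens.length + index.natAbs) + 20)
                    (by omega)).1 _ _ _ _ _ hE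
                  rw [hEF] at hA
                  simp at hA
    · obtain ⟨F0, hF⟩ : ∃ F0, 4 * (tokens.length + index.natAbs) + 20 = F0 + 1 :=
        ⟨4 * (tokens.length + index.natAbs) + 19, by omega⟩
      have htne : t ≠ "(" := ht
      rw [hF]; simp only [pAexpr]; rw [hg]; dsimp only
      rw [if_pos htne, if_pos htne]
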